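-- pv_equiv track=rewrite | github.com/kmkingsbury/raspberrypi-weather-station | station-code/collectweather.py | getwinddir
-- ===== SOURCE A (Python) =====
-- def getwinddir(windreading):
--     winddirtable = {
--                     (867, 917): 'W',
--                     (816, 866): 'NW',
--                     (770, 815): 'WNW',
--                     (714, 769): 'N',
--                     (644, 713): 'NWN',
--                     (598, 643): 'SW',
--                     (521, 597): 'SWW',
--                     (431, 520): 'NE',
--                     (348, 430): 'NNE',
--                     (269, 347): 'S',
--                     (218, 268): 'SSW',
--                     (159, 217): 'SE',
--                     (112, 158): 'SES',
--                     (90, 112): 'E',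
--                     (76, 89): 'NEE',
--                     (33, 75): 'ESE'
--                     }
--     for key in winddirtable:
--         if key[0] < windreading < key[1]:
--             return winddirtable[key]
-- ===== SOURCE B (Python) =====
-- # Binary search over the intervals sorted by lower bound instead of a linear dict scan.
-- _BOUNDS = [
--     (33, 75, 'ESE'), (76, 89, 'NEE'), (90, 112, 'E'), (112, 158, 'SES'),
--     (159, 217, 'SE'), (218, 268, 'SSW'), (269, 347, 'S'), (348, 430, 'NNE'),
--     (431, 520, 'NE'), (521, 597, 'SWW'), (598, 643, 'SW'), (644, 713, 'NWN'),
--     (714, 769, 'N'), (770, 815, 'WNW'), (816, 866, 'NW'), (867, 917, 'W'),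
-- ]
--
-- def getwinddir(windreading):
--     lo, hi = 0, len(_BOUNDS)
--     while lo < hi:  # bisect: count of lower bounds strictly below the reading
--         mid = (lo + hi) // 2
--         if _BOUNDS[mid][0] < windreading:
--             lo = mid + 1
--         else:
--             hi = mid
--     if lo >= 1:
--         low, high, name = _BOUNDS[lo - 1]
--         if low < windreading < high:
--             return name
--     return None
-- ===== Notes on version B (the rewrite author's own statement) =====
-- stated objective: alternative
-- what changed: Replaces A's linear scan over the dict of (low, high) interval keys with a binary search (bisect) over the intervals pre-sorted by lower bound, locating the single candidate interval and checking its strict bounds.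
import Mathlib
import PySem

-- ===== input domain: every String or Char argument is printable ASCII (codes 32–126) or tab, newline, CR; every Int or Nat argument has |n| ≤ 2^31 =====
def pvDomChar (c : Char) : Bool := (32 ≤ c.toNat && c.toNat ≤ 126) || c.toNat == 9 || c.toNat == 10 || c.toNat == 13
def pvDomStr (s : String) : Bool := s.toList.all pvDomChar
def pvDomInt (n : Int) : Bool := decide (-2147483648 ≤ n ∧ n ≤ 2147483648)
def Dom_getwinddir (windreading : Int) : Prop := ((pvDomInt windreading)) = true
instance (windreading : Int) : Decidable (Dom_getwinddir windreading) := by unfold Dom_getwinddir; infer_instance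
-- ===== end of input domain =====

-- B replaces A's linear scan of the dict with a binary search over the intervals sorted by lower bound (same return value everywhere).

-- ===== PORT A =====
-- the dict literal, in insertion order
def pvTable : List ((Int × Int) × String) :=
  [((867, 917), "W"), ((816, 866), "NW"), ((770, 815), "WNW"), ((714, 769), "N"),
   ((644, 713), "NWN"), ((598, 643), "SW"), ((521, 597), "SWW"), ((431, 520), "NE"),
   ((348, 430), "NNE"), ((269, 347), "S"), ((218, 268), "SSW"), ((159, 217), "SE"),
   ((112, 158), "SES"), ((90, 112), "E"), ((76, 89), "NEE"), ((33, 75), "ESE")]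

-- the `for key in winddirtable` loop with its early return
def pvLoopA (w : Int) : List ((Int × Int) × String) → Option String
  | [] => none
  | (k, v) :: rest => if k.1 < w ∧ w < k.2 then some v else pvLoopA w rest

def getwinddir (windreading : Int) : Option String :=
  pvLoopA windreading pvTable

-- ===== PORT B =====
-- the intervals sorted ascending by lower bound (Source B's _BOUNDS)
def pvBounds : List (Int × Int × String) :=
  [(33, 75, "ESE"), (76, 89, "NEE"), (90, 112, "E"), (112, 158, "SES"),
   (159, 217, "SE"), (218, 268, "SSW"), (269, 347, "S"), (348, 430, "NNE"),
   (431, 520, "NE"), (521, 597, "SWW"), (598, 643, "SW"), (644, 713, "NWN"),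
   (714, 769, "N"), (770, 815, "WNW"), (816, 866, "NW"), (867, 917, "W")]

-- Source B's while-loop: binary search for the number of lower bounds strictly below w.
-- The fuel argument only makes the while-loop total; it is never exhausted (hi - lo shrinks each step).
def pvBsearch (w : Int) : Nat → Nat → Nat → Nat
  | 0, lo, _hi => lo
  | fuel + 1, lo, hi =>
    if lo < hi then
      let mid := (lo + hi) / 2
      if ((pvBounds.getD mid (0, 0, "")).1 < w) then pvBsearch w fuel (mid + 1) hi
      else pvBsearch w fuel lo mid
    else lo

def getwinddir_alt (windreading : Int) : Option String :=
  let n := pvBounds.length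
  let lo := pvBsearch windreading n 0 n
  if 1 ≤ lo then
    let e := pvBounds.getD (lo - 1) (0, 0, "")
    if e.1 < windreading ∧ windreading < e.2.1 then some e.2.2 else none
  else none

-- ===== PRECONDITION & SPEC =====
def Spec_getwinddir (windreading : Int) (out : Option String) : Prop := out = getwinddir_alt windreading
instance (windreading : Int) (out : Option String) : Decidable (Spec_getwinddir windreading out) := by unfold Spec_getwinddir; infer_instance

-- ===== CLAIM (what is proved, stated in full; the proofs are below) =====
def Claim_equal_getwinddir : Prop := ∀ (windreading : Int), Dom_getwinddir windreading → Spec_getwinddir windreading (getwinddir windreading)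

-- ===== LEMMAS AND PROOFS =====
-- invariant of the binary-search loop: if exactly k lower bounds are strictly below w, the loop returns k
theorem bs_inv (w : Int) (k : Nat) : ∀ (fuel lo hi : Nat), hi ≤ 16 → lo ≤ k → k ≤ hi → hi - lo ≤ fuel →
    (∀ i, lo ≤ i → i < hi → ((pvBounds.getD i (0, 0, "")).1 < w ↔ i < k)) →
    pvBsearch w fuel lo hi = k := by
  intro fuel
  induction fuel with
  | zero => intro lo hi _ _ _ _ _; simp only [pvBsearch]; omega
  | succ n ih =>
    intro lo hi h16 hlk hkh hf hcmp
    simp only [pvBsearch]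
    split_ifs with hlt hc
    · exact ih (((lo + hi) / 2) + 1) hi h16
        (by have := (hcmp ((lo + hi) / 2) (by omega) (by omega)).mp hc; omega) hkh (by omega)
        (fun i h1 h2 => hcmp i (by omega) h2)
    · exact ih lo ((lo + hi) / 2) (by omega) hlk
        (by by_contra hk
            have := (hcmp ((lo + hi) / 2) (by omega) (by omega)).mpr (by omega); omega) (by omega)
        (fun i h1 h2 => hcmp i h1 (by omega))
    · omega

theorem getwinddir_eq (w : Int) : getwinddir w = getwinddir_alt w := by
  by_cases hlo : w ≤ 33
  · -- below every interval: A falls through all branches, the search returns 0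
    have hb : pvBsearch w 16 0 16 = 0 := by
      apply bs_inv w 0 16 0 16 (by omega) (by omega) (by omega) (by omega)
      intro i hi1 hi2; interval_cases i <;> simp [pvBounds] <;> omega
    unfold getwinddir getwinddir_alt
    simp only [pvTable, pvLoopA, show pvBounds.length = 16 from rfl, hb]
    rw [if_neg (show ¬(867 < w ∧ w < 917) by omega),
      if_neg (show ¬(816 < w ∧ w < 866) by omega),
      if_neg (show ¬(770 < w ∧ w < 815) by omega),
      if_neg (show ¬(714 < w ∧ w < 769) by omega),
      if_neg (show ¬(644 < w ∧ w < 713) by omega),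
      if_neg (show ¬(598 < w ∧ w < 643) by omega),
      if_neg (show ¬(521 < w ∧ w < 597) by omega),
      if_neg (show ¬(431 < w ∧ w < 520) by omega),
      if_neg (show ¬(348 < w ∧ w < 430) by omega),
      if_neg (show ¬(269 < w ∧ w < 347) by omega),
      if_neg (show ¬(218 < w ∧ w < 268) by omega),
      if_neg (show ¬(159 < w ∧ w < 217) by omega),
      if_neg (show ¬(112 < w ∧ w < 158) by omega),
      if_neg (show ¬(90 < w ∧ w < 112) by omega),
      if_neg (show ¬(76 < w ∧ w < 89) by omega),
      if_neg (show ¬(33 < w ∧ w < 75) by omega)]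
    rfl
  by_cases hhi : 918 ≤ w
  · -- above every interval: A falls through all branches, the search returns 16 but the upper check fails
    have hb : pvBsearch w 16 0 16 = 16 := by
      apply bs_inv w 16 16 0 16 (by omega) (by omega) (by omega) (by omega)
      intro i hi1 hi2; interval_cases i <;> simp [pvBounds] <;> omega
    unfold getwinddir getwinddir_alt
    simp only [pvTable, pvLoopA, show pvBounds.length = 16 from rfl, hb]
    rw [if_neg (show ¬(867 < w ∧ w < 917) by omega),
      if_neg (show ¬(816 < w ∧ w < 866) by omega),
      if_neg (show ¬(770 < w ∧ w < 815) by omega),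
      if_neg (show ¬(714 < w ∧ w < 769) by omega),
      if_neg (show ¬(644 < w ∧ w < 713) by omega),
      if_neg (show ¬(598 < w ∧ w < 643) by omega),
      if_neg (show ¬(521 < w ∧ w < 597) by omega),
      if_neg (show ¬(431 < w ∧ w < 520) by omega),
      if_neg (show ¬(348 < w ∧ w < 430) by omega),
      if_neg (show ¬(269 < w ∧ w < 347) by omega),
      if_neg (show ¬(218 < w ∧ w < 268) by omega),
      if_neg (show ¬(159 < w ∧ w < 217) by omega),
      if_neg (show ¬(112 < w ∧ w < 158) by omega),
      if_neg (show ¬(90 < w ∧ w < 112) by omega),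
      if_neg (show ¬(76 < w ∧ w < 89) by omega),
      if_neg (show ¬(33 < w ∧ w < 75) by omega)]
    norm_num [pvBounds]
    omega
  -- 33 < w < 918: finitely many readings, check each one
  have h1 : 33 < w := by omega
  have h2 : w < 918 := by omega
  interval_cases w <;> decide

-- ===== VERDICT (by name: the statement is the Claim_ definition above) =====
theorem getwinddir_spec : Claim_equal_getwinddir := by
  intro w _
  unfold Spec_getwinddir
  exact getwinddir_eq w
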